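-- pv_equiv track=rewrite | github.com/Kevinbastin/bill_excel | backend/ocr/extract_export.py | _box_to_xyxy
-- ===== SOURCE A (Python) =====
-- from typing import List, Dict, Any
--
-- def _box_to_xyxy(b: Any) -> Any:
--     try:
--         if not isinstance(b, (list, tuple)):
--             return None
--         b = list(b)
--         if len(b) == 4 and all(isinstance(v, (int, float)) for v in b):
--             x1, y1, x2, y2 = b
--             return int(min(x1, x2)), int(min(y1, y2)), int(max(x1, x2)), int(max(y1, y2))
--         if len(b) == 8 and all(isinstance(v, (int, float)) for v in b):
--             xs = b[0::2]
--             ys = b[1::2]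
--             return int(min(xs)), int(min(ys)), int(max(xs)), int(max(ys))
--         if len(b) == 4 and isinstance(b[0], (list, tuple)) and len(b[0]) == 2:
--             xs = [p[0] for p in b]
--             ys = [p[1] for p in b]
--             return int(min(xs)), int(min(ys)), int(max(xs)), int(max(ys))
--         return None
--     except:
--         return None
-- ===== SOURCE B (Python) =====
-- def _box_to_xyxy(b):
--     try:
--         if not isinstance(b, (list, tuple)):
--             return None
--         b = list(b)
--         if not all(isinstance(v, (int, float)) for v in b):
--             # only remaining accepted shape: four (x, y) pairs -> flatten to 8 coords
--             if len(b) == 4 and isinstance(b[0], (list, tuple)) and len(b[0]) == 2: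
--                 b = [c for p in b for c in (p[0], p[1])]
--             else:
--                 return None
--         if len(b) not in (4, 8):
--             return None
--         minx = miny = maxx = maxy = None
--         for i, v in enumerate(b):
--             if i % 2 == 0:
--                 minx = v if minx is None or v < minx else minx
--                 maxx = v if maxx is None or v > maxx else maxx
--             else:
--                 miny = v if miny is None or v < miny else miny
--                 maxy = v if maxy is None or v > maxy else maxy
--         return int(minx), int(miny), int(maxx), int(maxy)
--     except:
--         return None
-- ===== Notes on version B (the rewrite author's own statement) =====
-- stated objective: alternative
-- what changed: B replaces A's three branches with their slice/min/max passes by flattening the pair shape once and then computing all four extremes in a single online fold over the coordinates, dispatching x vs y by index parity.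
import Mathlib
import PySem

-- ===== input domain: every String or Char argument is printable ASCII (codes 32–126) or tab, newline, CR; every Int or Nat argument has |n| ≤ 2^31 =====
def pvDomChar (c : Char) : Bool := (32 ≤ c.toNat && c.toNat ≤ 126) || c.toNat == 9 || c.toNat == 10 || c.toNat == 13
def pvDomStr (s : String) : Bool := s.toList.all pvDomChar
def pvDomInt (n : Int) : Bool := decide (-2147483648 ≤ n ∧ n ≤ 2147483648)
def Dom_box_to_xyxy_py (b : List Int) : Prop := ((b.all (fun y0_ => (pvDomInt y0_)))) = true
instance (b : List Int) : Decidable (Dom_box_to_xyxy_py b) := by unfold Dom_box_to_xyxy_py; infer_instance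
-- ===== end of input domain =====

-- B computes all four extremes in one online min/max fold over the coordinate stream,
-- dispatching x vs y by index parity, instead of A's three shape branches with slices and
-- per-branch min/max. (Over List Int inputs the list-of-pairs branch of the Python is unreachable.)

-- ===== PORT A =====
-- A: three independent branches; len-4 unpacks four scalars, len-8 slices with step 2 and
-- takes min/max of each slice (Python min/max of a list → PySem.List.min?/max?, none unreachable here).
def box_to_xyxy_py (b : List Int) : Option (Int × Int × Int × Int) :=
  match b with
  | [x1, y1, x2, y2] => some (min x1 x2, min y1 y2, max x1 x2, max y1 y2)
  | _ =>
    if b.length = 8 then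
      match PySem.List.slice? b (some 0) none 2, PySem.List.slice? b (some 1) none 2 with
      | some xs, some ys =>
        match PySem.List.min? xs (fun v => v), PySem.List.min? ys (fun v => v),
              PySem.List.max? xs (fun v => v), PySem.List.max? ys (fun v => v) with
        | some mx, some my, some Mx, some My => some (mx, my, Mx, My)
        | _, _, _, _ => none
      | _, _ => none
    else none

-- ===== PORT B =====
-- B helper: one step of Source B's loop body — update an Optional running extreme with value v
-- (mirrors 'v if acc is None or v < acc else acc' / 'v if acc is None or v > acc else acc').
def pvUpdMin (acc : Option Int) (v : Int) : Option Int :=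
  match acc with
  | none => some v
  | some m => if v < m then some v else some m

def pvUpdMax (acc : Option Int) (v : Int) : Option Int :=
  match acc with
  | none => some v
  | some m => if m < v then some v else some m

-- B helper: the fold over enumerate(b) carrying (minx, miny, maxx, maxy), parity of the
-- index choosing which pair of accumulators is updated.
def pvFold (b : List Int) : Option Int × Option Int × Option Int × Option Int :=
  (PySem.List.enumerate b).foldl
    (fun st iv =>
      if iv.1 % 2 = 0 then
        (pvUpdMin st.1 iv.2, st.2.1, pvUpdMax st.2.2.1 iv.2, st.2.2.2)
      else
        (st.1, pvUpdMin st.2.1 iv.2, st.2.2.1, pvUpdMax st.2.2.2 iv.2))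
    (none, none, none, none)

def box_to_xyxy_py_alt (b : List Int) : Option (Int × Int × Int × Int) :=
  -- over List Int every element is numeric, so Source B's flatten branch for the pair shape never fires
  if b.length = 4 ∨ b.length = 8 then
    let st := pvFold b
    st.1.bind fun mx => st.2.1.bind fun my => st.2.2.1.bind fun Mx => st.2.2.2.bind fun My =>
      some (mx, my, Mx, My)
  else none

-- ===== PRECONDITION & SPEC =====
def Spec_box_to_xyxy_py (b : List Int) (out : Option (Int × Int × Int × Int)) : Prop := out = box_to_xyxy_py_alt b
instance (b : List Int) (out : Option (Int × Int × Int × Int)) : Decidable (Spec_box_to_xyxy_py b out) := by unfold Spec_box_to_xyxy_py; infer_instance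

-- ===== CLAIM =====
def Claim_equal_box_to_xyxy_py : Prop := ∀ (b : List Int), Dom_box_to_xyxy_py b → Spec_box_to_xyxy_py b (box_to_xyxy_py b)

-- ===== LEMMAS AND PROOFS =====
theorem upd_min_none (v : Int) : pvUpdMin none v = some v := rfl
theorem upd_max_none (v : Int) : pvUpdMax none v = some v := rfl
theorem upd_min_some (m v : Int) : pvUpdMin (some m) v = some (min v m) := by
  simp only [pvUpdMin]; split_ifs <;> simp <;> omega
theorem upd_max_some (m v : Int) : pvUpdMax (some m) v = some (max v m) := by
  simp only [pvUpdMax]; split_ifs <;> simp <;> omega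

-- ===== VERDICT =====
set_option maxHeartbeats 1000000 in
theorem box_to_xyxy_py_spec : Claim_equal_box_to_xyxy_py := by
  intro b _
  unfold Spec_box_to_xyxy_py box_to_xyxy_py box_to_xyxy_py_alt pvFold
  rcases b with _ | ⟨a1, _ | ⟨a2, _ | ⟨a3, _ | ⟨a4, _ | ⟨a5, _ | ⟨a6, _ | ⟨a7, _ | ⟨a8, _ | ⟨a9, t⟩⟩⟩⟩⟩⟩⟩⟩⟩ <;>
    simp [PySem.List.slice?, PySem.List.sliceIndices, List.range_succ,
          PySem.List.min?_id_cons, PySem.List.max?_id_cons,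
          PySem.List.enumerate_cons, PySem.List.enumerate_nil,
          upd_min_none, upd_max_none, upd_min_some, upd_max_some] <;>
    omega
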